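-- pv_equiv track=rewrite | github.com/stretchhog/article-recommender | articles/recommender/model/NaiveBayes.py | __bin_categoric_feature
-- ===== SOURCE A (Python) =====
-- def __bin_categoric_feature(x, y):
-- 	bin = {}
-- 	for value, label in zip(x, y):
-- 		if value in bin:
-- 			if label:
-- 				bin[value]['+'] += 1
-- 			else:
-- 				bin[value]['-'] += 1
-- 		else:
-- 			bin[value] = {}
-- 			bin[value]['+'] = 0
-- 			bin[value]['-'] = 0
-- 			if label:
-- 				bin[value]['+'] = 1
-- 			else:
-- 				bin[value]['-'] = 1
-- 	return bin
-- ===== SOURCE B (Python) =====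
-- def __bin_categoric_feature(x, y):
-- 	# Two separate passes: flat (value, bool(label)) tally first, then assemble
-- 	# the nested dict over the distinct values in first-appearance order.
-- 	pairs = list(zip(x, y))
-- 	counts = {}
-- 	for value, label in pairs:
-- 		key = (value, bool(label))
-- 		counts[key] = counts.get(key, 0) + 1
-- 	order = dict.fromkeys(v for v, _ in pairs)
-- 	return {v: {'+': counts.get((v, True), 0), '-': counts.get((v, False), 0)} for v in order}
-- ===== Notes on version B (the rewrite author's own statement) =====
-- stated objective: alternative
-- what changed: Replaces the single loop that builds and mutates nested per-value dicts with two separate passes: a flat Counter-style tally keyed by (value, bool(label)), then assembly of the nested result over the distinct values in first-appearance order.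
import Mathlib
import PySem

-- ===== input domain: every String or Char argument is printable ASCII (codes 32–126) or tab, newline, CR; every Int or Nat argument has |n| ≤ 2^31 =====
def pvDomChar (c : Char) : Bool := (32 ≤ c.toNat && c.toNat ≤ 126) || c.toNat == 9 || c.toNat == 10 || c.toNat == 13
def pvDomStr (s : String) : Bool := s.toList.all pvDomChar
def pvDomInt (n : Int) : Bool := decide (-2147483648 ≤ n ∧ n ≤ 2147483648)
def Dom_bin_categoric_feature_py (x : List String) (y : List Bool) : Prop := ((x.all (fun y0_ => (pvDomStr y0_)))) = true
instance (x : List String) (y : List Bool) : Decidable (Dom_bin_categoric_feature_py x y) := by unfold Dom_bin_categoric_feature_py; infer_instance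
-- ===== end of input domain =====

-- B replaces A's single loop mutating nested per-value dicts by two separate passes
-- (flat (value,label) tally, then assembly over distinct values); alternative decomposition, same cost.


-- ===== PORT A =====
-- one loop over zip(x,y): nested dict bin[value]['+'/'-'] created on first sight and mutated in place
def binStepA (bin : PySem.Dict String (PySem.Dict String Int)) (p : String × Bool) :
    PySem.Dict String (PySem.Dict String Int) :=
  match bin.get? p.1 with
  | some inner =>
      if p.2 then bin.insert p.1 (inner.insert "+" (inner.getD "+" 0 + 1))
      else bin.insert p.1 (inner.insert "-" (inner.getD "-" 0 + 1))
  | none =>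
      let inner := (((PySem.Dict.empty : PySem.Dict String Int).insert "+" 0).insert "-" 0)
      if p.2 then bin.insert p.1 (inner.insert "+" 1)
      else bin.insert p.1 (inner.insert "-" 1)

def bin_categoric_feature_py (x : List String) (y : List Bool) : List (String × List (String × Int)) :=
  (((x.zip y).foldl binStepA PySem.Dict.empty).items).map (fun q => (q.1, q.2.items))

-- ===== PORT B =====
def bin_categoric_feature_py_alt (x : List String) (y : List Bool) : List (String × List (String × Int)) :=
  let pairs := x.zip y
  -- pass 1: flat tally keyed by (value, label)
  let counts := pairs.foldl (fun c p => c.insert p (c.getD p 0 + 1))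
      (PySem.Dict.empty : PySem.Dict (String × Bool) Int)
  -- pass 2: distinct values in first-appearance order, then assemble
  let order := PySem.Set.ofList (pairs.map Prod.fst)
  order.map (fun v => (v, [("+", counts.getD (v, true) 0), ("-", counts.getD (v, false) 0)]))

-- ===== PRECONDITION & SPEC =====
def Spec_bin_categoric_feature_py (x : List String) (y : List Bool) (out : List (String × List (String × Int))) : Prop := out = bin_categoric_feature_py_alt x y
instance (x : List String) (y : List Bool) (out : List (String × List (String × Int))) : Decidable (Spec_bin_categoric_feature_py x y out) := by unfold Spec_bin_categoric_feature_py; infer_instance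

-- ===== CLAIM (what is proved, stated in full; the proofs are below) =====
def Claim_equal_bin_categoric_feature_py : Prop := ∀ (x : List String) (y : List Bool), Dom_bin_categoric_feature_py x y → Spec_bin_categoric_feature_py x y (bin_categoric_feature_py x y)


-- ===== LEMMAS AND PROOFS =====

-- the inner dict A maintains for value v after processing zs
def innerD (zs : List (String × Bool)) (v : String) : PySem.Dict String Int :=
  PySem.Dict.mk [("+", (zs.count (v, true) : Int)), ("-", (zs.count (v, false) : Int))]

-- A's outer dict after processing zs
def buildD (zs : List (String × Bool)) : PySem.Dict String (PySem.Dict String Int) :=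
  PySem.Dict.mk ((PySem.Set.ofList (zs.map Prod.fst)).map (fun v => (v, innerD zs v)))

lemma keys_buildD (zs : List (String × Bool)) :
    (buildD zs).keys = PySem.Set.ofList (zs.map Prod.fst) := by
  simp [buildD, PySem.Dict.keys, List.map_map]
  have : ((fun (x : String × PySem.Dict String Int) => x.1) ∘ fun v => (v, innerD zs v)) = id := rfl
  rw [this, List.map_id]

lemma nodup_keys_buildD (zs : List (String × Bool)) : (buildD zs).keys.Nodup := by
  rw [keys_buildD]; exact PySem.Set.nodup_ofList _

lemma get?_buildD (zs : List (String × Bool)) (v : String) :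
    (buildD zs).get? v =
      if v ∈ zs.map Prod.fst then some (innerD zs v) else none := by
  by_cases h : v ∈ zs.map Prod.fst
  · rw [if_pos h]
    have hmem : (v, innerD zs v) ∈ (buildD zs).items := by
      simp [buildD]
      obtain ⟨⟨w, c⟩, hm, rfl⟩ := List.mem_map.mp h
      cases c
      · exact Or.inl hm
      · exact Or.inr hm
    exact PySem.Dict.get?_of_mem_items _ hmem (nodup_keys_buildD zs)
  · rw [if_neg h, PySem.Dict.get?_eq_none_iff_not_mem_keys, keys_buildD]
    exact fun hm => h ((PySem.Set.mem_ofList _ _).mp hm)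

lemma contains_buildD (zs : List (String × Bool)) (v : String) :
    (buildD zs).contains v = decide (v ∈ zs.map Prod.fst) := by
  rw [PySem.Dict.contains_eq_decide_mem_keys, keys_buildD]
  simp [PySem.Set.mem_ofList]

lemma inner_insert_plus (a b c : Int) :
    (PySem.Dict.mk [("+", a), ("-", b)]).insert "+" c = PySem.Dict.mk [("+", c), ("-", b)] := by
  apply PySem.Dict.ext
  simp [PySem.Dict.items_insert]

lemma inner_insert_minus (a b c : Int) :
    (PySem.Dict.mk [("+", a), ("-", b)]).insert "-" c = PySem.Dict.mk [("+", a), ("-", c)] := by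
  apply PySem.Dict.ext
  simp [PySem.Dict.items_insert]

lemma getD_innerD_plus (zs : List (String × Bool)) (v : String) :
    (innerD zs v).getD "+" 0 = (zs.count (v, true) : Int) := by
  simp [innerD, PySem.Dict.getD_eq_get?_getD, PySem.Dict.get?_mk_cons]

lemma getD_innerD_minus (zs : List (String × Bool)) (v : String) :
    (innerD zs v).getD "-" 0 = (zs.count (v, false) : Int) := by
  simp [innerD, PySem.Dict.getD_eq_get?_getD, PySem.Dict.get?_mk_cons]

lemma count_append_ne (zs : List (String × Bool)) (p q : String × Bool) (h : q.1 ≠ p.1) :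
    (zs ++ [p]).count q = zs.count q := by
  simp [List.count_append, List.count_cons]
  intro he; exact absurd (congrArg Prod.fst he).symm h

lemma step_buildD (zs : List (String × Bool)) (p : String × Bool) :
    binStepA (buildD zs) p = buildD (zs ++ [p]) := by
  obtain ⟨a, b⟩ := p
  unfold binStepA
  rw [get?_buildD]
  by_cases h : a ∈ zs.map Prod.fst
  · simp only [if_pos h]
    have hset : PySem.Set.ofList ((zs ++ [(a, b)]).map Prod.fst)
        = PySem.Set.ofList (zs.map Prod.fst) := by
      simp only [List.map_append, List.map_cons, List.map_nil]
      rw [PySem.Set.ofList_append_singleton,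
        PySem.Set.add_of_mem ((PySem.Set.mem_ofList _ _).mpr h)]
    have hmain : ∀ (d : PySem.Dict String Int), d = innerD (zs ++ [(a, b)]) a →
        (buildD zs).insert a d = buildD (zs ++ [(a, b)]) := by
      intro d hd
      apply PySem.Dict.ext
      rw [PySem.Dict.items_insert_of_contains _ _ (by rw [contains_buildD]; exact decide_eq_true h)]
      show ((PySem.Set.ofList (zs.map Prod.fst)).map (fun v => (v, innerD zs v))).map _
          = (buildD (zs ++ [(a, b)])).items
      rw [List.map_map]
      show _ = (PySem.Set.ofList ((zs ++ [(a, b)]).map Prod.fst)).map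
          (fun v => (v, innerD (zs ++ [(a, b)]) v))
      rw [hset]
      apply List.map_congr_left
      intro v hv
      by_cases hva : v = a
      · have hb : ((v, innerD zs v).1 == a) = true := by simpa using hva
        simp only [Function.comp, hb, if_true]
        rw [hd, hva]
      · simp only [Function.comp]
        have : ((v, innerD zs v).1 == a) = false := by simpa using hva
        simp only [this, Bool.false_eq_true, if_false]
        have h1 : innerD (zs ++ [(a, b)]) v = innerD zs v := by
          unfold innerD
          rw [count_append_ne _ _ _ (by simpa using hva),
            count_append_ne _ _ _ (by simpa using hva)]
        rw [h1]
    cases b with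
    | true =>
        apply hmain
        rw [getD_innerD_plus]
        unfold innerD
        rw [inner_insert_plus]
        simp [List.count_append]
    | false =>
        simp only [Bool.false_eq_true, if_false]
        apply hmain
        rw [getD_innerD_minus]
        unfold innerD
        rw [inner_insert_minus]
        simp [List.count_append]
  · simp only [if_neg h]
    have hc : (buildD zs).contains a = false := by rw [contains_buildD]; exact decide_eq_false h
    have hset : PySem.Set.ofList ((zs ++ [(a, b)]).map Prod.fst)
        = PySem.Set.ofList (zs.map Prod.fst) ++ [a] := by
      simp only [List.map_append, List.map_cons, List.map_nil]
      rw [PySem.Set.ofList_append_singleton,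
        PySem.Set.add_of_not_mem (fun hm => h ((PySem.Set.mem_ofList _ _).mp hm))]
    have hcount0 : ∀ c : Bool, zs.count (a, c) = 0 := by
      intro c
      rw [List.count_eq_zero]
      intro hm
      exact h (List.mem_map.mpr ⟨(a, c), hm, rfl⟩)
    have hmain : ∀ (d : PySem.Dict String Int), d = innerD (zs ++ [(a, b)]) a →
        (buildD zs).insert a d = buildD (zs ++ [(a, b)]) := by
      intro d hd
      apply PySem.Dict.ext
      rw [PySem.Dict.items_insert_of_not_contains _ _ hc]
      show (buildD zs).items ++ [(a, d)]
          = (PySem.Set.ofList ((zs ++ [(a, b)]).map Prod.fst)).map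
              (fun v => (v, innerD (zs ++ [(a, b)]) v))
      rw [hset, List.map_append]
      congr 1
      · show ((PySem.Set.ofList (zs.map Prod.fst)).map (fun v => (v, innerD zs v))) = _
        apply List.map_congr_left
        intro v hv
        have hvm : v ∈ zs.map Prod.fst := (PySem.Set.mem_ofList _ _).mp hv
        have hva : v ≠ a := fun he => h (he ▸ hvm)
        have h1 : innerD (zs ++ [(a, b)]) v = innerD zs v := by
          unfold innerD
          rw [count_append_ne _ _ _ (by simpa using hva),
            count_append_ne _ _ _ (by simpa using hva)]
        rw [h1]
      · simp [hd]
    cases b with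
    | true =>
        apply hmain
        unfold innerD
        rw [show (((PySem.Dict.empty : PySem.Dict String Int).insert "+" 0).insert "-" 0).insert "+" 1
            = PySem.Dict.mk [("+", 1), ("-", 0)] from by decide]
        simp [List.count_append, hcount0]
    | false =>
        simp only [Bool.false_eq_true, if_false]
        apply hmain
        unfold innerD
        rw [show (((PySem.Dict.empty : PySem.Dict String Int).insert "+" 0).insert "-" 0).insert "-" 1
            = PySem.Dict.mk [("+", 0), ("-", 1)] from by decide]
        simp [List.count_append, hcount0]

lemma foldl_buildD (l zs : List (String × Bool)) :
    l.foldl binStepA (buildD zs) = buildD (zs ++ l) := by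
  induction l generalizing zs with
  | nil => simp
  | cons p l ih =>
      simp only [List.foldl_cons, step_buildD, ih]
      simp

lemma buildD_nil : (PySem.Dict.empty : PySem.Dict String (PySem.Dict String Int)) = buildD [] := rfl

lemma A_canonical (x : List String) (y : List Bool) :
    bin_categoric_feature_py x y
      = (PySem.Set.ofList ((x.zip y).map Prod.fst)).map (fun v =>
          (v, [("+", ((x.zip y).count (v, true) : Int)), ("-", ((x.zip y).count (v, false) : Int))])) := by
  unfold bin_categoric_feature_py
  rw [buildD_nil, foldl_buildD, List.nil_append]
  show ((PySem.Set.ofList ((x.zip y).map Prod.fst)).map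
      (fun v => (v, innerD (x.zip y) v))).map (fun q => (q.1, q.2.items)) = _
  rw [List.map_map]
  rfl

lemma B_canonical (x : List String) (y : List Bool) :
    bin_categoric_feature_py_alt x y
      = (PySem.Set.ofList ((x.zip y).map Prod.fst)).map (fun v =>
          (v, [("+", ((x.zip y).count (v, true) : Int)), ("-", ((x.zip y).count (v, false) : Int))])) := by
  unfold bin_categoric_feature_py_alt
  simp only [PySem.Dict.foldl_insert_getD_add_one_eq_counter, PySem.Dict.getD_counter]

-- ===== VERDICT (by name: the statement is the Claim_ definition above) =====
theorem bin_categoric_feature_py_spec : Claim_equal_bin_categoric_feature_py := by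
  intro x y _
  unfold Spec_bin_categoric_feature_py
  rw [A_canonical, B_canonical]
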